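-- pv_equiv track=rewrite | github.com/melisekm/Advent-of-code | 2024/09/src.py | find_consecutive_space_of
-- ===== SOURCE A (Python) =====
-- def find_consecutive_space_of(blob, length_to_find, max_search_space):
--     idx = blob.index(".")
--     while idx <= max_search_space:
--         start = idx
--         found = 0
--         if blob[idx] != '.':
--             idx += 1
--             continue
--         while idx <= max_search_space and blob[idx] == '.':
--             idx += 1
--             found += 1
--             if found == length_to_find:
--                 return start
--     return None
-- ===== SOURCE B (Python) =====
-- def find_consecutive_space_of(blob, length_to_find, max_search_space):
--     idx = blob.index(".")  # same ValueError as the original when there is no "."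
--     mask = "".join("." if x == "." else "x" for x in blob)
--     if length_to_find > len(mask):
--         return None  # a pattern longer than the text can never occur
--     i = mask.find("." * length_to_find, idx)
--     if i != -1 and i + length_to_find - 1 <= max_search_space:
--         return i
--     return None
-- ===== Notes on version B (the rewrite author's own statement) =====
-- stated objective: alternative
-- what changed: Replaces A's nested index-walking while-loops (outer skip loop + inner run counter with continue/restart) by building a '.'/'x' mask string once and doing a single substring search for '.' * length_to_find from the first dot, followed by one boundary check i + length_to_find - 1 <= max_search_space.
-- intended difference: For length_to_find <= 0 when the first '.' is at an index j with j + length_to_find - 1 <= max_search_space, A returns None (its counter is checked only after incrementing, so a non-positive target can never be hit), while B returns j, the standard empty-pattern-matches-immediately answer (cf. str.find('') == 0), which is the intended value for a degenerate length. — e.g. on find_consecutive_space_of(["."], 0, 0): A returns none, B returns some 0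
import Mathlib
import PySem

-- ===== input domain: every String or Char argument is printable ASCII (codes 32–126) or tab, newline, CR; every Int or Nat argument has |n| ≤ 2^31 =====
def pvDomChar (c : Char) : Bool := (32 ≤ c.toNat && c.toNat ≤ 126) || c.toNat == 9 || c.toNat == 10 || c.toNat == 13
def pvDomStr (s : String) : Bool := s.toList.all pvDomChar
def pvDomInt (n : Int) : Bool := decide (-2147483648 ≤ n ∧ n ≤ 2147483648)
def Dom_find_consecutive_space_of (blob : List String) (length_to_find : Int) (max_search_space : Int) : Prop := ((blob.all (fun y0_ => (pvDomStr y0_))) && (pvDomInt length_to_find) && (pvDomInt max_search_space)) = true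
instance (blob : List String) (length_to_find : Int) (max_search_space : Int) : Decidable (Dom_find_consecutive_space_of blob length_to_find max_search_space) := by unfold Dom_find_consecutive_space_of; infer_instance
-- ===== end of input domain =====

-- B replaces A's nested index-walking while-loops by one substring search for
-- "." * length_to_find over a precomputed '.'/'x' mask string (objective: alternative;
-- same O(n) cost; B intentionally differs from A on non-positive length_to_find, see D_).

-- ===== PORT A =====
-- The two while loops become a mutual recursion on idx.  In the inner loop, the exit on a
-- non-dot element returns to the outer loop, whose iteration at that (known non-dot) index is
-- exactly `idx += 1; continue`; that one step is inlined here as `aOuter … (idx+1)` so the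
-- mutual recursion terminates.  `pyGet? = none` (Python's IndexError) yields `none`;
-- Pre_ excludes those inputs.
mutual
def aOuter (blob : List String) (length_to_find max_search_space : Int) (idx : Int) : Option Int :=
  if idx ≤ max_search_space then
    match PySem.List.pyGet? blob idx with
    | none => none          -- IndexError
    | some x =>
      if x ≠ "." then aOuter blob length_to_find max_search_space (idx + 1)
      else aInner blob length_to_find max_search_space idx idx 0
  else none
termination_by ((max_search_space - idx + 1).toNat, 1)

def aInner (blob : List String) (length_to_find max_search_space : Int) (start idx found : Int) : Option Int :=
  if idx ≤ max_search_space then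
    match PySem.List.pyGet? blob idx with
    | none => none          -- IndexError
    | some x =>
      if x = "." then
        if found + 1 = length_to_find then some start
        else aInner blob length_to_find max_search_space start (idx + 1) (found + 1)
      else aOuter blob length_to_find max_search_space (idx + 1)   -- inlined outer step at a non-dot index
  else none
termination_by ((max_search_space - idx + 1).toNat, 0)
end

def find_consecutive_space_of (blob : List String) (length_to_find : Int) (max_search_space : Int) : Option Int :=
  match PySem.List.index? blob "." with
  | none => none            -- ValueError from blob.index(".")
  | some j => aOuter blob length_to_find max_search_space (j : Int)

-- ===== PORT B =====
def find_consecutive_space_of_alt (blob : List String) (length_to_find : Int) (max_search_space : Int) : Option Int :=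
  match PySem.List.index? blob "." with
  | none => none            -- ValueError from blob.index(".")
  | some idx =>
    let mask : String := PySem.Str.join "" (blob.map (fun x => if x = "." then "." else "x"))
    if length_to_find > PySem.Str.len mask then none  -- a pattern longer than the text can never occur
    else
      let pat : String := String.ofList (PySem.List.pyRepeat ['.'] length_to_find)  -- "." * length_to_find (pyRepeat is exact: n ≤ 0 gives "")
      let i : Int := PySem.Str.findFrom mask pat (idx : Int) none
      if i ≠ -1 ∧ i + length_to_find - 1 ≤ max_search_space then some i else none

-- ===== PRECONDITION & SPEC =====
-- Pre_ is exactly where Python A returns: "." must occur (else ValueError), and either the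
-- scan is cut off before the end of the list (max_search_space < length) or, with
-- length_to_find ≥ 1, a run of length_to_find dots exists, so A returns before reading
-- past the end (else IndexError).
def Pre_find_consecutive_space_of (blob : List String) (length_to_find : Int) (max_search_space : Int) : Prop :=
  "." ∈ blob ∧
    (max_search_space < (blob.length : Int) ∨
      (1 ≤ length_to_find ∧ length_to_find.toNat ≤ blob.length ∧
        ∃ i < blob.length, ∀ j < length_to_find.toNat, blob[i + j]? = some "."))
instance (blob : List String) (length_to_find : Int) (max_search_space : Int) : Decidable (Pre_find_consecutive_space_of blob length_to_find max_search_space) := by unfold Pre_find_consecutive_space_of; infer_instance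

def pvWitness_find_consecutive_space_of : List String × Int × Int := (["x", ".", "."], 2, 2)

-- For length_to_find ≤ 0 when the first "." is at index j with j + length_to_find - 1 ≤
-- max_search_space, A returns none (its counter is checked only after incrementing, so a
-- non-positive target is never hit) while B returns j, the standard
-- empty-pattern-matches-immediately answer, which is the intended value there.
def D_find_consecutive_space_of (blob : List String) (length_to_find : Int) (max_search_space : Int) : Prop :=
  length_to_find ≤ 0 ∧ "." ∈ blob ∧ (blob.idxOf "." : Int) + length_to_find - 1 ≤ max_search_space
instance (blob : List String) (length_to_find : Int) (max_search_space : Int) : Decidable (D_find_consecutive_space_of blob length_to_find max_search_space) := by unfold D_find_consecutive_space_of; infer_instance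

def Spec_find_consecutive_space_of (blob : List String) (length_to_find : Int) (max_search_space : Int) (out : Option Int) : Prop := ¬ D_find_consecutive_space_of blob length_to_find max_search_space → out = find_consecutive_space_of_alt blob length_to_find max_search_space
instance (blob : List String) (length_to_find : Int) (max_search_space : Int) (out : Option Int) : Decidable (Spec_find_consecutive_space_of blob length_to_find max_search_space out) := by unfold Spec_find_consecutive_space_of; infer_instance

def pvDiffWitness_find_consecutive_space_of : List String × Int × Int := (["."], 0, 0)
def pvDiffWitnessOut_find_consecutive_space_of : (Option Int) × (Option Int) := (none, some 0)

-- ===== CLAIM (what is proved, stated in full; the proofs are below) =====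
def Claim_unchanged_find_consecutive_space_of : Prop := ∀ (blob : List String) (length_to_find : Int) (max_search_space : Int), Dom_find_consecutive_space_of blob length_to_find max_search_space → Pre_find_consecutive_space_of blob length_to_find max_search_space → Spec_find_consecutive_space_of blob length_to_find max_search_space (find_consecutive_space_of blob length_to_find max_search_space)
def Claim_changed_find_consecutive_space_of : Prop := Dom_find_consecutive_space_of (pvDiffWitness_find_consecutive_space_of.1) (pvDiffWitness_find_consecutive_space_of.2.1) (pvDiffWitness_find_consecutive_space_of.2.2) ∧ Pre_find_consecutive_space_of (pvDiffWitness_find_consecutive_space_of.1) (pvDiffWitness_find_consecutive_space_of.2.1) (pvDiffWitness_find_consecutive_space_of.2.2) ∧ D_find_consecutive_space_of (pvDiffWitness_find_consecutive_space_of.1) (pvDiffWitness_find_consecutive_space_of.2.1) (pvDiffWitness_find_consecutive_space_of.2.2) ∧ find_consecutive_space_of (pvDiffWitness_find_consecutive_space_of.1) (pvDiffWitness_find_consecutive_space_of.2.1) (pvDiffWitness_find_consecutive_space_of.2.2) = pvDiffWitnessOut_find_consecutive_space_of.1 ∧ find_consecutive_space_of_alt (pvDiffWitness_find_consecutive_space_of.1)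 (pvDiffWitness_find_consecutive_space_of.2.1) (pvDiffWitness_find_consecutive_space_of.2.2) = pvDiffWitnessOut_find_consecutive_space_of.2 ∧ pvDiffWitnessOut_find_consecutive_space_of.1 ≠ pvDiffWitnessOut_find_consecutive_space_of.2
def Claim_exact_find_consecutive_space_of : Prop := ∀ (blob : List String) (length_to_find : Int) (max_search_space : Int), Dom_find_consecutive_space_of blob length_to_find max_search_space → Pre_find_consecutive_space_of blob length_to_find max_search_space → D_find_consecutive_space_of blob length_to_find max_search_space → find_consecutive_space_of blob length_to_find max_search_space ≠ find_consecutive_space_of_alt blob length_to_find max_search_space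

-- ===== LEMMAS AND PROOFS =====

-- `winB blob c j`: the c positions j, j+1, …, j+c-1 of blob all hold ".".
def winB (blob : List String) (c : Nat) (j : Nat) : Bool :=
  (List.range c).all (fun t => blob[j + t]? == some ".")

theorem winB_true_iff (blob : List String) (c j : Nat) :
    winB blob c j = true ↔ ∀ t < c, blob[j + t]? = some "." := by
  simp [winB]

-- first window position, scanning left to right
def firstWin (blob : List String) (c : Nat) : Option Nat :=
  (List.range blob.length).find? (fun j => winB blob c j)

-- the common specification both ports are proved equal to (for 1 ≤ length_to_find)
def targetF (blob : List String) (c : Nat) (M : Int) : Option Int :=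
  match firstWin blob c with
  | some f => if (f : Int) + (c : Int) - 1 ≤ M then some (f : Int) else none
  | none => none

theorem find?_range_spec (p : Nat → Bool) (n f : Nat)
    (h : (List.range n).find? p = some f) :
    p f = true ∧ (∀ j < f, p j = false) ∧ f < n := by
  induction n with
  | zero => simp [List.range_zero] at h
  | succ m ih =>
    rw [List.range_succ, List.find?_append] at h
    cases hm : (List.range m).find? p with
    | some g =>
      rw [hm] at h
      simp at h
      subst h
      obtain ⟨h1, h2, h3⟩ := ih hm
      exact ⟨h1, h2, by omega⟩
    | none =>
      rw [hm] at h
      have hall : ∀ j < m, p j = false := by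
        intro j hj
        have := List.find?_eq_none.mp hm j (by simp [hj])
        simpa using this
      have h' : p m = true ∧ f = m := by
        cases hpm : p m with
        | false => rw [Option.none_or] at h; simp [List.find?, hpm] at h
        | true =>
          rw [Option.none_or] at h
          simp [List.find?, hpm] at h
          exact ⟨rfl, h.symm⟩
      obtain ⟨h1, h2⟩ := h'
      subst h2
      exact ⟨h1, by intro j hj; exact hall j (by omega), by omega⟩

theorem find?_range_eq_some_of (p : Nat → Bool) (n f : Nat)
    (hf : f < n) (hp : p f = true) (hmin : ∀ j < f, p j = false) :
    (List.range n).find? p = some f := by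
  induction n with
  | zero => omega
  | succ m ih =>
    rw [List.range_succ, List.find?_append]
    by_cases hfm : f < m
    · rw [ih hfm]; rfl
    · have hfe : f = m := by omega
      subst hfe
      have : (List.range f).find? p = none := by
        rw [List.find?_eq_none]
        intro j hj
        simp at hj
        simp [hmin j hj]
      rw [this]
      simp [hp]

theorem winB_lt_length (blob : List String) (c j : Nat) (hc : 1 ≤ c)
    (h : winB blob c j = true) : j + c ≤ blob.length := by
  have := (winB_true_iff blob c j).mp h (c - 1) (by omega)
  have hlt : j + (c - 1) < blob.length := by
    by_contra hge
    rw [List.getElem?_eq_none (by omega)] at this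
    simp at this
  omega

-- `replicate c a` is a prefix of l iff the first c entries of l are all a
theorem replicate_prefix_iff {α : Type} (c : Nat) (a : α) (l : List α) :
    List.replicate c a <+: l ↔ ∀ t < c, l[t]? = some a := by
  constructor
  · rintro ⟨rest, hrest⟩ t ht
    rw [← hrest, List.getElem?_append_left (by simp [ht]), List.getElem?_replicate]
    simp [ht]
  · intro h
    have hlen : c ≤ l.length := by
      rcases Nat.eq_zero_or_pos c with h0 | h0
      · omega
      · have := h (c - 1) (by omega)
        by_contra hge
        rw [List.getElem?_eq_none (by omega)] at this
        simp at this
    rw [List.prefix_iff_eq_take]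
    apply List.ext_getElem?
    intro t
    by_cases ht : t < c
    · rw [List.getElem?_replicate, List.getElem?_take]
      simp [ht, h t ht]
    · rw [List.getElem?_replicate, List.getElem?_take]
      simp [ht]

-- the mask string's characters: one '.'/'x' mark per element of blob
theorem mask_toList (blob : List String) :
    (PySem.Str.join "" (blob.map (fun x => if x = "." then "." else "x"))).toList
      = blob.map (fun x => if x = "." then '.' else 'x') := by
  rw [PySem.Str.toList_join]
  have : (blob.map (fun x => if x = "." then "." else "x")).map String.toList
      = (blob.map (fun x => if x = "." then '.' else 'x')).map (fun c => [c]) := by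
    simp only [List.map_map]
    apply List.map_congr_left
    intro x _
    by_cases hx : x = "." <;> simp [hx]
  simp only [String.toList, this]
  exact PySem.Chars.join_nil_singletons _

-- window at j in blob ↔ the dot-pattern is a prefix of the mask from j
theorem winB_iff_prefix (blob : List String) (c j : Nat) :
    winB blob c j = true ↔
      List.replicate c '.' <+: (blob.map (fun x => if x = "." then '.' else 'x')).drop j := by
  rw [winB_true_iff, replicate_prefix_iff]
  apply forall_congr'
  intro t
  apply imp_congr_right
  intro _
  rw [List.getElem?_drop, List.getElem?_map]
  constructor
  · intro h; rw [h]; simp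
  · intro h
    cases hb : blob[j + t]? with
    | none => rw [hb] at h; simp at h
    | some s =>
      rw [hb] at h
      simp at h
      rw [h]

-- ===== A-port = targetF (for 1 ≤ length_to_find) =====
-- Downward induction with fuel m ≥ blob.length - n.  The outer-loop invariant is "no window
-- starts before n"; the inner-loop invariant at counter k is "positions n-k … n-1 are dots
-- and no window starts before n-k".
theorem invA (blob : List String) (L M : Int) (hL : 1 ≤ L) :
    ∀ (m n : Nat), blob.length - n ≤ m →
      ((∀ j < n, winB blob L.toNat j = false) →
          aOuter blob L M (n : Int) = targetF blob L.toNat M)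
      ∧ (∀ k : Nat, k < L.toNat → k ≤ n →
          (∀ t < k, blob[(n - k) + t]? = some ".") →
          (∀ j < n - k, winB blob L.toNat j = false) →
          aInner blob L M ((n : Int) - (k : Int)) (n : Int) k = targetF blob L.toNat M) := by
  intro m
  induction m with
  | zero =>
    intro n hm
    have hn : blob.length ≤ n := by omega
    have hget : PySem.List.pyGet? blob (n : Int) = blob[n]? := PySem.List.pyGet?_natCast ..
    have hnone : blob[n]? = none := by simp; omega
    have hc : 1 ≤ L.toNat := by omega
    constructor
    · intro hnw
      have hfw : firstWin blob L.toNat = none := by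
        rw [firstWin, List.find?_eq_none]
        intro j hj
        simp at hj
        simp [hnw j (by omega)]
      rw [targetF, hfw, aOuter]
      split
      · simp [hget, hnone]
      · rfl
    · intro k hk hkn hcred hnw
      have hfw : firstWin blob L.toNat = none := by
        rw [firstWin, List.find?_eq_none]
        intro j hj
        simp at hj
        by_cases hw : winB blob L.toNat j = true
        · have := winB_lt_length blob L.toNat j hc hw
          exact absurd (hnw j (by omega)) (by simp [hw])
        · simpa using hw
      rw [targetF, hfw, aInner]
      split
      · simp [hget, hnone]
      · rfl
  | succ m ih =>
    intro n hm
    by_cases hn : blob.length ≤ n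
    · exact ih n (by omega)
    · rw [not_le] at hn
      have hget : PySem.List.pyGet? blob (n : Int) = some blob[n] := by
        rw [PySem.List.pyGet?_natCast]; simp [hn]
      have hc : 1 ≤ L.toNat := by omega
      by_cases hM : (n : Int) ≤ M
      case neg =>
        -- past the limit: both loops stop; any window would start at ≥ n (resp. n-k) and
        -- end past M, so targetF is none as well
        constructor
        · intro hnw
          have hO : aOuter blob L M n = none := by rw [aOuter]; simp [hM]
          rw [hO, targetF]
          cases hfw : firstWin blob L.toNat with
          | none => rfl
          | some f =>
            obtain ⟨hpf, _, _⟩ := find?_range_spec _ _ _ hfw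
            have hf : n ≤ f := by
              by_contra hlt
              exact absurd (hnw f (by omega)) (by simp [hpf])
            show none = if ((f : Int) + (L.toNat : Int) - 1 ≤ M) then some (f : Int) else none
            rw [if_neg (by push_cast; omega)]
        · intro k hk hkn hcred hnw
          have hI : aInner blob L M ((n : Int) - k) n k = none := by
            rw [aInner]; simp [hM]
          rw [hI, targetF]
          cases hfw : firstWin blob L.toNat with
          | none => rfl
          | some f =>
            obtain ⟨hpf, _, _⟩ := find?_range_spec _ _ _ hfw
            have hf : n - k ≤ f := by
              by_contra hlt
              exact absurd (hnw f (by omega)) (by simp [hpf])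
            show none = if ((f : Int) + (L.toNat : Int) - 1 ≤ M) then some (f : Int) else none
            rw [if_neg (by push_cast; omega)]
      case pos =>
      by_cases hx : blob[n] = "."
      case neg =>
        -- non-dot at n: outer skips; inner exits to outer; no window can cross position n
        have hIH := (ih (n + 1) (by omega)).1
        constructor
        · intro hnw
          have hnw' : ∀ j < n + 1, winB blob L.toNat j = false := by
            intro j hj
            by_cases hjn : j < n
            · exact hnw j hjn
            · have hj' : j = n := by omega
              subst hj'
              by_contra hw
              have hw' : winB blob L.toNat j = true := by simpa using hw
              have := (winB_true_iff ..).mp hw' 0 (by omega)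
              simp at this
              exact hx (by
                have hlt : j < blob.length := hn
                rw [List.getElem?_eq_getElem hlt] at this
                exact Option.some.inj this)
          have := hIH hnw'
          push_cast at this
          rw [aOuter]
          simp only [if_pos hM, hget]
          rw [if_pos (by simpa using hx)]
          exact this
        · intro k hk hkn hcred hnw
          have hnw' : ∀ j < n + 1, winB blob L.toNat j = false := by
            intro j hj
            by_cases hjn : j < n - k
            · exact hnw j hjn
            · -- a window at j ∈ [n-k, n] would contain the non-dot position n
              by_contra hw
              have hw' : winB blob L.toNat j = true := by simpa using hw
              have ht : n - j < L.toNat := by omega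
              have := (winB_true_iff ..).mp hw' (n - j) ht
              have hje : j + (n - j) = n := by omega
              rw [hje] at this
              rw [List.getElem?_eq_getElem hn] at this
              exact hx (Option.some.inj this)
          have := hIH hnw'
          push_cast at this
          rw [aInner]
          simp only [if_pos hM, hget]
          rw [if_neg hx]
          exact this
      case pos =>
        -- dot at n
        have hIHI := (ih (n + 1) (by omega)).2
        have hInner : ∀ k : Nat, k < L.toNat → k ≤ n →
            (∀ t < k, blob[(n - k) + t]? = some ".") →
            (∀ j < n - k, winB blob L.toNat j = false) →
            aInner blob L M ((n : Int) - (k : Int)) (n : Int) k = targetF blob L.toNat M := by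
          intro k hk hkn hcred hnw
          rw [aInner]
          simp only [if_pos hM, hget, if_pos hx]
          by_cases hdone : (k : Int) + 1 = L
          · rw [if_pos hdone]
            -- found the first window: it starts at n - k and ends at n ≤ M
            have hck : L.toNat = k + 1 := by omega
            have hwin : winB blob L.toNat (n - k) = true := by
              rw [winB_true_iff]
              intro t ht
              rw [hck] at ht
              by_cases htk : t < k
              · exact hcred t htk
              · have hte : n - k + t = n := by omega
                rw [hte, List.getElem?_eq_getElem hn, hx]
            have hfw : firstWin blob L.toNat = some (n - k) := by
              apply find?_range_eq_some_of _ _ _ (by omega) hwin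
              intro j hj
              exact hnw j hj
            rw [targetF, hfw]
            show some ((n : Int) - k) = if (((n - k : Nat) : Int) + (L.toNat : Int) - 1 ≤ M) then some ((n - k : Nat) : Int) else none
            rw [if_pos (by push_cast; omega)]
            congr 1
            push_cast
            omega
          · rw [if_neg hdone]
            have hk1 : k + 1 < L.toNat := by omega
            have := hIHI (k + 1) hk1 (by omega)
              (by
                intro t ht
                have he : n + 1 - (k + 1) = n - k := by omega
                rw [he]
                by_cases htk : t < k
                · exact hcred t htk
                · have hte : n - k + t = n := by omega
                  rw [hte, List.getElem?_eq_getElem hn, hx])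
              (by
                intro j hj
                exact hnw j (by omega))
            push_cast at this
            have harg : ((n : Int) + 1) - ((k : Int) + 1) = (n : Int) - k := by ring
            rw [harg] at this
            convert this using 2
        refine ⟨?_, hInner⟩
        intro hnw
        rw [aOuter]
        simp only [if_pos hM, hget]
        rw [if_neg (by simpa using hx)]
        have := hInner 0 (by omega) (by omega) (by intro t ht; omega) (by simpa using hnw)
        simpa using this

-- A's port never returns a value for non-positive length_to_find (the counter equals
-- found + 1 ≥ 1 when tested)
theorem aOuter_none_of_nonpos (blob : List String) (L M : Int) (hL : L ≤ 0) :
    ∀ (m n : Nat), (M - n + 1).toNat ≤ m →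
      (∀ s : Int, ∀ k : Nat, aInner blob L M s (n : Int) k = none)
      ∧ aOuter blob L M (n : Int) = none := by
  intro m
  induction m with
  | zero =>
    intro n hm
    have hM : ¬ ((n : Int) ≤ M) := by omega
    exact ⟨fun s k => by rw [aInner]; simp [hM], by rw [aOuter]; simp [hM]⟩
  | succ m ih =>
    intro n hm
    by_cases hM : (n : Int) ≤ M
    · have hfuel : (M - (n + 1 : Nat) + 1).toNat ≤ m := by
        push_cast; omega
      have hI : ∀ s : Int, ∀ k : Nat, aInner blob L M s (n : Int) k = none := by
        intro s k
        rw [aInner]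
        simp only [if_pos hM]
        cases hget : PySem.List.pyGet? blob (n : Int) with
        | none => rfl
        | some x =>
          show (if x = "." then (if (k : Int) + 1 = L then some s else aInner blob L M s ((n : Int) + 1) ((k : Int) + 1)) else aOuter blob L M ((n : Int) + 1)) = none
          by_cases hx : x = "."
          · rw [if_pos hx, if_neg (by omega)]
            have := (ih (n + 1) hfuel).1 s (k + 1)
            push_cast at this
            convert this using 2
          · rw [if_neg hx]
            have := (ih (n + 1) hfuel).2
            push_cast at this
            exact this
      refine ⟨hI, ?_⟩
      rw [aOuter]
      simp only [if_pos hM]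
      cases hget : PySem.List.pyGet? blob (n : Int) with
      | none => rfl
      | some x =>
        show (if x ≠ "." then aOuter blob L M ((n : Int) + 1) else aInner blob L M (n : Int) (n : Int) 0 ) = none
        by_cases hx : x = "."
        · rw [if_neg (by simpa using hx)]
          have h0 := hI (n : Int) 0
          simpa using h0
        · rw [if_pos (by simpa using hx)]
          have := (ih (n + 1) hfuel).2
          push_cast at this
          exact this
    · exact ⟨fun s k => by rw [aInner]; simp [hM], by rw [aOuter]; simp [hM]⟩

-- idxOf from the first-occurrence facts delivered by index?
theorem idxOf_eq_of_first (blob : List String) (j : Nat) (hj : j < blob.length)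
    (hv : blob[j] = ".") (hmin : ∀ i, i < j → ∀ (hi : i < blob.length), blob[i] ≠ ".") :
    blob.idxOf "." = j := by
  induction blob generalizing j with
  | nil => simp at hj
  | cons x xs ihx =>
    cases j with
    | zero =>
      have hx : x = "." := by simpa using hv
      simp [hx]
    | succ j' =>
      have hx : x ≠ "." := by
        have := hmin 0 (by omega) (by simp)
        simpa using this
      have hrec : xs.idxOf "." = j' :=
        ihx j' (by simpa using hj) (by simpa using hv)
          (by
            intro i hi hi'
            have := hmin (i + 1) (by omega) (by simpa using Nat.succ_lt_succ hi')
            simpa using this)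
      simp [hx, hrec]

-- the none-case helper used above
theorem find?_range_spec_none (blob : List String) (c : Nat)
    (h : firstWin blob c = none) : ∀ j < blob.length, winB blob c j = false := by
  intro j hj
  have := List.find?_eq_none.mp h j (by simp [hj])
  simpa using this

-- B-port = targetF (for 1 ≤ length_to_find)
theorem altB_eq_target (blob : List String) (L M : Int) (hL : 1 ≤ L)
    (idx : Nat) (hidx : PySem.List.index? blob "." = some idx) :
    find_consecutive_space_of_alt blob L M = targetF blob L.toNat M := by
  obtain ⟨hjlt, hjv, hjmin⟩ := PySem.List.getElem_of_index?_eq_some hidx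
  have hc : 1 ≤ L.toNat := by omega
  set maskL : List Char := blob.map (fun x => if x = "." then '.' else 'x') with hmaskL
  have hmlen : maskL.length = blob.length := by simp [hmaskL]
  have hklen : idx ≤ maskL.length := by omega
  have hpatL : (String.ofList (PySem.List.pyRepeat ['.'] L)).toList = List.replicate L.toNat '.' := by
    rw [PySem.List.pyRepeat_singleton]
    simp
  have hslen : PySem.Str.len (PySem.Str.join "" (blob.map (fun x => if x = "." then "." else "x"))) = (blob.length : Int) := by
    rw [PySem.Str.len_eq, mask_toList]
    simp
  unfold find_consecutive_space_of_alt
  simp only [hidx]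
  by_cases hbig : L > PySem.Str.len (PySem.Str.join "" (blob.map (fun x => if x = "." then "." else "x")))
  case pos =>
    rw [if_pos hbig]
    rw [hslen] at hbig
    cases hfw : firstWin blob L.toNat with
    | none => rw [targetF, hfw]
    | some f =>
      obtain ⟨hpf, _, _⟩ := find?_range_spec _ _ _ hfw
      have := winB_lt_length blob L.toNat f hc hpf
      omega
  case neg =>
  rw [if_neg hbig]
  simp only [PySem.Str.findFrom_eq, mask_toList, hpatL, ← hmaskL]
  cases hfw : firstWin blob L.toNat with
  | some f =>
    obtain ⟨hpf, hminf, hflt⟩ := find?_range_spec _ _ _ hfw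
    have hfidx : idx ≤ f := by
      by_contra hlt
      have := (winB_true_iff ..).mp hpf 0 (by omega)
      simp at this
      have hflt' : f < blob.length := by omega
      rw [List.getElem?_eq_getElem hflt'] at this
      exact hjmin f (by omega) (Option.some.inj this)
    have hpre : List.replicate L.toNat '.' <+: (maskL.drop idx).drop (f - idx) := by
      rw [List.drop_drop]
      have : idx + (f - idx) = f := by omega
      rw [this]
      exact (winB_iff_prefix blob L.toNat f).mp hpf
    have hinf : List.replicate L.toNat '.' <:+: maskL.drop idx := by
      rw [← PySem.Chars.isIn_iff_infix]
      exact (PySem.Chars.exists_prefix_drop_iff_isIn _ _).mp ⟨f - idx, hpre⟩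
    have hne : PySem.Chars.findFrom maskL (List.replicate L.toNat '.') (idx : Int) ≠ -1 := by
      intro hcontra
      rw [PySem.Chars.findFrom_natCast_eq_neg_one_iff _ _ _ hklen] at hcontra
      exact hcontra hinf
    obtain ⟨hge, hpreF, hminF⟩ := PySem.Chars.findFrom_natCast_spec maskL (List.replicate L.toNat '.') idx hklen hne
    set F := PySem.Chars.findFrom maskL (List.replicate L.toNat '.') (idx : Int) with hF
    have hF0 : 0 ≤ F := le_trans (by omega) hge
    have hwinF : winB blob L.toNat F.toNat = true :=
      (winB_iff_prefix blob L.toNat F.toNat).mpr hpreF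
    have hfF : f ≤ F.toNat := by
      by_contra hlt
      exact absurd (hminf F.toNat (by omega)) (by simp [hwinF])
    have hFf : F.toNat ≤ f := by
      by_contra hlt
      exact absurd (hminF f (by omega) (by omega)) (by
        simp only [not_not]
        exact (winB_iff_prefix blob L.toNat f).mp hpf)
    have hFeq : F = (f : Int) := by omega
    rw [targetF, hfw]
    rw [hFeq]
    by_cases hbound : (f : Int) + L - 1 ≤ M
    · rw [if_pos ⟨by omega, hbound⟩]
      show some ((f : Int)) = if ((f : Int) + (L.toNat : Int) - 1 ≤ M) then some ((f : Int)) else none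
      rw [if_pos (by omega)]
    · rw [if_neg (fun h => hbound h.2)]
      show (none : Option Int) = if ((f : Int) + (L.toNat : Int) - 1 ≤ M) then some ((f : Int)) else none
      rw [if_neg (by omega)]
  | none =>
    have hnall : ∀ j, winB blob L.toNat j = false := by
      intro j
      by_cases hjl : j < blob.length
      · exact (find?_range_spec_none _ _ hfw) j hjl
      · by_contra hw
        have hw' : winB blob L.toNat j = true := by simpa using hw
        have := winB_lt_length blob L.toNat j hc hw'
        omega
    have hninf : ¬ (List.replicate L.toNat '.' <:+: maskL.drop idx) := by
      intro hinf
      rw [← PySem.Chars.isIn_iff_infix] at hinf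
      obtain ⟨j, hj⟩ := (PySem.Chars.exists_prefix_drop_iff_isIn _ _).mpr hinf
      rw [List.drop_drop] at hj
      have := (winB_iff_prefix blob L.toNat (idx + j)).mpr hj
      exact absurd (hnall (idx + j)) (by simp [this])
    have : PySem.Chars.findFrom maskL (List.replicate L.toNat '.') (idx : Int) = -1 := by
      rw [PySem.Chars.findFrom_natCast_eq_neg_one_iff _ _ _ hklen]
      exact hninf
    rw [targetF, hfw, this]
    simp

-- B's value for non-positive length: the empty pattern is found at idx immediately
theorem altB_nonpos (blob : List String) (L M : Int) (hL : L ≤ 0)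
    (idx : Nat) (hidx : PySem.List.index? blob "." = some idx) :
    find_consecutive_space_of_alt blob L M
      = (if (idx : Int) + L - 1 ≤ M then some (idx : Int) else none) := by
  obtain ⟨hjlt, _, _⟩ := PySem.List.getElem_of_index?_eq_some hidx
  set maskL : List Char := blob.map (fun x => if x = "." then '.' else 'x') with hmaskL
  have hklen : idx ≤ maskL.length := by simp [hmaskL]; omega
  have hpatL : (String.ofList (PySem.List.pyRepeat ['.'] L)).toList = ([] : List Char) := by
    rw [PySem.List.pyRepeat_singleton]
    have : L.toNat = 0 := by omega
    rw [this, List.replicate_zero]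
    simp
  have hslen : PySem.Str.len (PySem.Str.join "" (blob.map (fun x => if x = "." then "." else "x"))) = (blob.length : Int) := by
    rw [PySem.Str.len_eq, mask_toList]
    simp
  unfold find_consecutive_space_of_alt
  simp only [hidx]
  rw [if_neg (by rw [hslen]; omega)]
  simp only [PySem.Str.findFrom_eq, mask_toList, hpatL, ← hmaskL]
  rw [PySem.Chars.findFrom_natCast _ _ _ hklen, PySem.Chars.find_nil]
  simp only [if_neg (by norm_num : ¬ ((0 : Int) = -1))]
  by_cases hb : (idx : Int) + L - 1 ≤ M
  · rw [if_pos ⟨by omega, by omega⟩, if_pos hb]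
    norm_num
  · rw [if_neg (by intro h; exact hb (by omega))]
    rw [if_neg hb]

-- ===== VERDICT (by name: the statement is the Claim_ definition above) =====
theorem find_consecutive_space_of_spec : Claim_unchanged_find_consecutive_space_of := by
  intro blob L M _ _
  unfold Spec_find_consecutive_space_of
  intro hnD
  cases hidx : PySem.List.index? blob "." with
  | none =>
    unfold find_consecutive_space_of find_consecutive_space_of_alt
    rw [hidx]
  | some idx =>
    obtain ⟨hjlt, hjv, hjmin⟩ := PySem.List.getElem_of_index?_eq_some hidx
    by_cases hL : 1 ≤ L
    · have hA : find_consecutive_space_of blob L M = targetF blob L.toNat M := by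
        unfold find_consecutive_space_of
        rw [hidx]
        exact (invA blob L M hL blob.length idx (by omega)).1 (by
          intro j hj
          by_contra hw
          have hw' : winB blob L.toNat j = true := by simpa using hw
          have := (winB_true_iff ..).mp hw' 0 (by omega)
          simp at this
          have hjl : j < blob.length := by omega
          rw [List.getElem?_eq_getElem hjl] at this
          exact hjmin j hj (Option.some.inj this))
      rw [hA, altB_eq_target blob L M hL idx hidx]
    · have hL0 : L ≤ 0 := by omega
      have hA : find_consecutive_space_of blob L M = none := by
        unfold find_consecutive_space_of
        rw [hidx]
        exact (aOuter_none_of_nonpos blob L M hL0 (M - idx + 1).toNat idx (by omega)).2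
      have hmem : "." ∈ blob := by rw [← hjv]; exact List.getElem_mem hjlt
      have hio : blob.idxOf "." = idx :=
        idxOf_eq_of_first blob idx hjlt hjv (by intro i hi hi'; exact hjmin i hi)
      have hnb : ¬ ((idx : Int) + L - 1 ≤ M) := by
        intro hb
        exact hnD ⟨hL0, hmem, by rw [hio]; exact hb⟩
      rw [hA, altB_nonpos blob L M hL0 idx hidx, if_neg hnb]

theorem find_consecutive_space_of_changed : Claim_changed_find_consecutive_space_of := by
  unfold Claim_changed_find_consecutive_space_of
  refine ⟨by decide, by decide, by decide, ?_, by decide, by decide⟩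
  show find_consecutive_space_of ["."] 0 0 = none
  unfold find_consecutive_space_of
  rw [show PySem.List.index? ["."] "." = some 0 from rfl]
  exact (aOuter_none_of_nonpos ["."] 0 0 (by omega) 1 0 (by simp)).2

theorem find_consecutive_space_of_tight : Claim_exact_find_consecutive_space_of := by
  intro blob L M _ _ hD
  obtain ⟨hL0, hmem, hb⟩ := hD
  obtain ⟨idx, hidx⟩ := Option.isSome_iff_exists.mp ((PySem.List.index?_isSome_iff ..).mpr hmem)
  obtain ⟨hjlt, hjv, hjmin⟩ := PySem.List.getElem_of_index?_eq_some hidx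
  have hio : blob.idxOf "." = idx :=
    idxOf_eq_of_first blob idx hjlt hjv (by intro i hi hi'; exact hjmin i hi)
  have hA : find_consecutive_space_of blob L M = none := by
    unfold find_consecutive_space_of
    rw [hidx]
    exact (aOuter_none_of_nonpos blob L M hL0 (M - idx + 1).toNat idx (by omega)).2
  have hB : find_consecutive_space_of_alt blob L M = some (idx : Int) := by
    rw [altB_nonpos blob L M hL0 idx hidx, if_pos (by rw [hio] at hb; exact hb)]
  rw [hA, hB]
  simp
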